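-- pv_equiv track=rewrite | github.com/manassevisser-dot/huishoudApp | brace_audit.py | _scoped_text
-- ===== SOURCE A (Python) =====
-- from typing import List, Optional, Dict, Any, Tuple
--
-- def _within_scope(line_no: int, start_line: Optional[int], end_line: Optional[int],
--                   start_marker_line: Optional[int], end_marker_line: Optional[int]) -> bool:
--     if start_marker_line is not None and end_marker_line is not None:
--         return start_marker_line <= line_no <= end_marker_line
--     if start_line is not None and end_line is not None:
--         return start_line <= line_no <= end_line
--     return True
--
-- def _scoped_text(lines: List[str], start_line, end_line, start_marker_line, end_marker_line) -> Tuple[str, List[int]]: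
--     scoped_lines = []
--     original_line_numbers = []
--     for i, ln in enumerate(lines, start=1):
--         if _within_scope(i, start_line, end_line, start_marker_line, end_marker_line):
--             scoped_lines.append(ln)
--             original_line_numbers.append(i)
--     return "\n".join(scoped_lines), original_line_numbers
-- ===== SOURCE B (Python) =====
-- def _scoped_text(lines, start_line, end_line, start_marker_line, end_marker_line):
--     n = len(lines)
--     if start_marker_line is not None and end_marker_line is not None:
--         lo, hi = start_marker_line, end_marker_line
--     elif start_line is not None and end_line is not None:
--         lo, hi = start_line, end_line
--     else:
--         lo, hi = 1, n
--     start_idx = max(lo - 1, 0)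
--     end_idx = min(max(hi, 0), n)
--     segment = lines[start_idx:end_idx]
--     return "\n".join(segment), list(range(start_idx + 1, start_idx + 1 + len(segment)))
-- ===== Notes on version B (the rewrite author's own statement) =====
-- stated objective: faster
-- what changed: Replaces the per-line scope-predicate loop with a single clamped interval computation followed by one slice and a range of line numbers.
import Mathlib
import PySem

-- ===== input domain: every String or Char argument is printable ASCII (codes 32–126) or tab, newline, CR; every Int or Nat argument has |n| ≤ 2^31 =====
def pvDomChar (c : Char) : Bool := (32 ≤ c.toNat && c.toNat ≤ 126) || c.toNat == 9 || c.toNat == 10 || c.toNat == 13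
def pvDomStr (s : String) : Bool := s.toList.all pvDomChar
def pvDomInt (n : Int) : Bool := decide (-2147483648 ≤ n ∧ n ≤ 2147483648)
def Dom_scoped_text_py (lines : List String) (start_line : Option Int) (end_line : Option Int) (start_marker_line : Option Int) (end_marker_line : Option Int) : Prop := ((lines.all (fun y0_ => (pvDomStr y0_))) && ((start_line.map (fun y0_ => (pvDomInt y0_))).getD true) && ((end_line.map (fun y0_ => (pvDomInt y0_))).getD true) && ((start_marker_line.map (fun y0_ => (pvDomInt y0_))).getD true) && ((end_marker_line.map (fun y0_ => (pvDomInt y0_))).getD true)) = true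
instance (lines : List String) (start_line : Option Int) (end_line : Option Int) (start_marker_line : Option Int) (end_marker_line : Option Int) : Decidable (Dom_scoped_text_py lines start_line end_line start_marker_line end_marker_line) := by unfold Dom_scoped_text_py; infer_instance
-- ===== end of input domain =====

-- B replaces A's per-line scope-predicate loop by one clamped interval computation, a single slice and a range of line numbers (constant-factor faster; return value only, no side effects involved).

-- ===== PORT A =====
-- port of _within_scope
def within_scope (line_no : Int) (start_line end_line start_marker_line end_marker_line : Option Int) : Bool :=
  match start_marker_line, end_marker_line with
  | some a, some b => decide (a ≤ line_no ∧ line_no ≤ b)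
  | _, _ =>
    match start_line, end_line with
    | some a, some b => decide (a ≤ line_no ∧ line_no ≤ b)
    | _, _ => true

def scoped_text_py (lines : List String) (start_line : Option Int) (end_line : Option Int) (start_marker_line : Option Int) (end_marker_line : Option Int) : String × List Int :=
  let r := (PySem.List.enumerate lines 1).foldl
    (fun (acc : List String × List Int) p =>
      if within_scope p.1 start_line end_line start_marker_line end_marker_line then
        (acc.1 ++ [p.2], acc.2 ++ [p.1])
      else acc)
    ([], [])
  (PySem.Str.join "\n" r.1, r.2)

-- ===== PORT B =====
def scoped_text_py_alt (lines : List String) (start_line : Option Int) (end_line : Option Int) (start_marker_line : Option Int) (end_marker_line : Option Int) : String × List Int :=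
  let n : Int := lines.length
  let lohi : Int × Int :=
    match start_marker_line, end_marker_line with
    | some a, some b => (a, b)
    | _, _ =>
      match start_line, end_line with
      | some a, some b => (a, b)
      | _, _ => (1, n)
  let start_idx : Int := max (lohi.1 - 1) 0
  let end_idx : Int := min (max lohi.2 0) n
  let segment := PySem.List.slice lines (some start_idx) (some end_idx)
  (PySem.Str.join "\n" segment,
   PySem.List.pyRange (start_idx + 1) (start_idx + 1 + (segment.length : Int)) 1)

-- ===== PRECONDITION & SPEC =====
def Spec_scoped_text_py (lines : List String) (start_line : Option Int) (end_line : Option Int) (start_marker_line : Option Int) (end_marker_line : Option Int) (out : String × List Int) : Prop := out = scoped_text_py_alt lines start_line end_line start_marker_line end_marker_line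
instance (lines : List String) (start_line : Option Int) (end_line : Option Int) (start_marker_line : Option Int) (end_marker_line : Option Int) (out : String × List Int) : Decidable (Spec_scoped_text_py lines start_line end_line start_marker_line end_marker_line out) := by unfold Spec_scoped_text_py; infer_instance

-- ===== CLAIM (what is proved, stated in full; the proofs are below) =====
def Claim_equal_scoped_text_py : Prop := ∀ (lines : List String) (start_line : Option Int) (end_line : Option Int) (start_marker_line : Option Int) (end_marker_line : Option Int), Dom_scoped_text_py lines start_line end_line start_marker_line end_marker_line → Spec_scoped_text_py lines start_line end_line start_marker_line end_marker_line (scoped_text_py lines start_line end_line start_marker_line end_marker_line)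

-- ===== LEMMAS AND PROOFS =====

-- A's loop with its two appended accumulators is a filter with two maps.
theorem fold_pair (q : Int × String → Bool) (ps : List (Int × String))
    (acc1 : List String) (acc2 : List Int) :
    ps.foldl
      (fun (acc : List String × List Int) p =>
        if q p then (acc.1 ++ [p.2], acc.2 ++ [p.1]) else acc) (acc1, acc2)
    = (acc1 ++ (ps.filter q).map (·.2), acc2 ++ (ps.filter q).map (·.1)) := by
  induction ps generalizing acc1 acc2 with
  | nil => simp
  | cons p ps ih =>
    by_cases h : q p = true
    · simp [List.foldl_cons, h, ih]
    · simp only [Bool.not_eq_true] at h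
      simp [List.foldl_cons, h, ih]

-- filtering enumerate by a clamped index interval is enumerate of a take/drop segment
theorem filter_enumerate_interval (lines : List String) (A B : Nat) (hB : B ≤ lines.length) :
    (PySem.List.enumerate lines 1).filter
        (fun p => decide ((A : Int) < p.1 ∧ p.1 ≤ (B : Int)))
    = PySem.List.enumerate ((lines.drop A).take (B - A)) ((A : Int) + 1) := by
  by_cases hBA : B ≤ A
  · have h1 : B - A = 0 := by omega
    rw [h1]
    simp only [List.take_zero, PySem.List.enumerate_nil]
    apply List.filter_eq_nil_iff.mpr
    intro p hp
    obtain ⟨k, hk, rfl⟩ := (PySem.List.mem_enumerate_iff _ _ _).mp hp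
    simp only [decide_eq_true_eq]
    omega
  · have hAB : A < B := by omega
    have hA : A ≤ lines.length := by omega
    have hsplit : lines = lines.take A ++ ((lines.drop A).take (B - A) ++ lines.drop B) := by
      have h2 : (lines.drop A).take (B - A) ++ lines.drop B = lines.drop A := by
        have : lines.drop B = (lines.drop A).drop (B - A) := by
          rw [List.drop_drop]; congr 1; omega
        rw [this, List.take_append_drop]
      rw [h2, List.take_append_drop]
    conv_lhs => rw [hsplit]
    rw [PySem.List.enumerate_append, PySem.List.enumerate_append, List.filter_append,
      List.filter_append]
    have hlen_t : (lines.take A).length = A := by simp [hA]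
    have hlen_m : ((lines.drop A).take (B - A)).length = B - A := by
      simp; omega
    have ht : (PySem.List.enumerate (lines.take A) 1).filter
        (fun p => decide ((A : Int) < p.1 ∧ p.1 ≤ (B : Int))) = [] := by
      apply List.filter_eq_nil_iff.mpr
      intro p hp
      obtain ⟨k, hk, rfl⟩ := (PySem.List.mem_enumerate_iff _ _ _).mp hp
      simp only [decide_eq_true_eq]
      rw [hlen_t] at hk
      omega
    have hm : (PySem.List.enumerate ((lines.drop A).take (B - A)) (1 + (lines.take A).length)).filter
        (fun p => decide ((A : Int) < p.1 ∧ p.1 ≤ (B : Int)))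
        = PySem.List.enumerate ((lines.drop A).take (B - A)) (1 + (lines.take A).length) := by
      apply List.filter_eq_self.mpr
      intro p hp
      obtain ⟨k, hk, rfl⟩ := (PySem.List.mem_enumerate_iff _ _ _).mp hp
      simp only [decide_eq_true_eq]
      rw [hlen_m] at hk
      rw [hlen_t]
      omega
    have hr : (PySem.List.enumerate (lines.drop B)
          (1 + (lines.take A).length + ((lines.drop A).take (B - A)).length)).filter
        (fun p => decide ((A : Int) < p.1 ∧ p.1 ≤ (B : Int))) = [] := by
      apply List.filter_eq_nil_iff.mpr
      intro p hp
      obtain ⟨k, hk, rfl⟩ := (PySem.List.mem_enumerate_iff _ _ _).mp hp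
      simp only [decide_eq_true_eq]
      rw [hlen_t, hlen_m]
      omega
    rw [ht, hm, hr, List.nil_append, List.append_nil, hlen_t]
    congr 1
    omega

-- the whole of A's body equals the whole of B's body, for any predicate that is an
-- interval test [lo, hi] on the line numbers actually occurring
theorem A_eq_B (lines : List String) (q : Int → Bool) (lo hi : Int)
    (hq : ∀ i : Int, 1 ≤ i → i ≤ (lines.length : Int) → q i = decide (lo ≤ i ∧ i ≤ hi)) :
    (let r := (PySem.List.enumerate lines 1).foldl
        (fun (acc : List String × List Int) p =>
          if q p.1 then (acc.1 ++ [p.2], acc.2 ++ [p.1]) else acc) ([], [])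
     (PySem.Str.join "\n" r.1, r.2))
    = (let start_idx : Int := max (lo - 1) 0
       let segment := PySem.List.slice lines (some start_idx)
         (some (min (max hi 0) (lines.length : Int)))
       (PySem.Str.join "\n" segment,
        PySem.List.pyRange (start_idx + 1) (start_idx + 1 + (segment.length : Int)) 1)) := by
  simp only []
  rw [fold_pair]
  set a : Int := max (lo - 1) 0 with ha
  set b : Int := min (max hi 0) (lines.length : Int) with hb
  have ha0 : 0 ≤ a := le_max_right _ _
  have hb0 : 0 ≤ b := by
    rw [hb]; exact le_min (le_max_right _ _) (Int.natCast_nonneg _)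
  have hbn : b.toNat ≤ lines.length := by omega
  have hcong : (PySem.List.enumerate lines 1).filter (fun p => q p.1)
      = (PySem.List.enumerate lines 1).filter
          (fun p => decide ((a.toNat : Int) < p.1 ∧ p.1 ≤ (b.toNat : Int))) := by
    apply List.filter_congr
    intro p hp
    obtain ⟨k, hk, rfl⟩ := (PySem.List.mem_enumerate_iff _ _ _).mp hp
    rw [hq (1 + k) (by omega) (by omega)]
    simp only [decide_eq_decide]
    omega
  rw [hcong, filter_enumerate_interval lines a.toNat b.toNat hbn]
  have hslice : PySem.List.slice lines (some a) (some b)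
      = (lines.drop a.toNat).take (b.toNat - a.toNat) := PySem.List.slice_toNat lines ha0 hb0
  rw [hslice]
  rw [PySem.List.map_snd_enumerate, PySem.List.map_fst_enumerate,
    Int.toNat_of_nonneg ha0]
  rfl

-- ===== VERDICT (by name: the statement is the Claim_ definition above) =====
theorem scoped_text_py_spec : Claim_equal_scoped_text_py := by
  intro lines sl el sml eml _
  unfold Spec_scoped_text_py scoped_text_py scoped_text_py_alt
  rcases sml with _ | a <;> rcases eml with _ | b <;> rcases sl with _ | c <;> rcases el with _ | d
  · exact A_eq_B lines (fun i => within_scope i none none none none) 1 (lines.length : Int)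
          (fun i h1 h2 => by simp [within_scope, h1, h2])
  · exact A_eq_B lines (fun i => within_scope i none (some d) none none) 1 (lines.length : Int)
          (fun i h1 h2 => by simp [within_scope, h1, h2])
  · exact A_eq_B lines (fun i => within_scope i (some c) none none none) 1 (lines.length : Int)
          (fun i h1 h2 => by simp [within_scope, h1, h2])
  · exact A_eq_B lines (fun i => within_scope i (some c) (some d) none none) c d
          (fun i h1 h2 => by simp [within_scope])
  · exact A_eq_B lines (fun i => within_scope i none none none (some b)) 1 (lines.length : Int)
          (fun i h1 h2 => by simp [within_scope, h1, h2])
  · exact A_eq_B lines (fun i => within_scope i none (some d) none (some b)) 1 (lines.length : Int)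
          (fun i h1 h2 => by simp [within_scope, h1, h2])
  · exact A_eq_B lines (fun i => within_scope i (some c) none none (some b)) 1 (lines.length : Int)
          (fun i h1 h2 => by simp [within_scope, h1, h2])
  · exact A_eq_B lines (fun i => within_scope i (some c) (some d) none (some b)) c d
          (fun i h1 h2 => by simp [within_scope])
  · exact A_eq_B lines (fun i => within_scope i none none (some a) none) 1 (lines.length : Int)
          (fun i h1 h2 => by simp [within_scope, h1, h2])
  · exact A_eq_B lines (fun i => within_scope i none (some d) (some a) none) 1 (lines.length : Int)
          (fun i h1 h2 => by simp [within_scope, h1, h2])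
  · exact A_eq_B lines (fun i => within_scope i (some c) none (some a) none) 1 (lines.length : Int)
          (fun i h1 h2 => by simp [within_scope, h1, h2])
  · exact A_eq_B lines (fun i => within_scope i (some c) (some d) (some a) none) c d
          (fun i h1 h2 => by simp [within_scope])
  · exact A_eq_B lines (fun i => within_scope i none none (some a) (some b)) a b
          (fun i h1 h2 => by simp [within_scope])
  · exact A_eq_B lines (fun i => within_scope i none (some d) (some a) (some b)) a b
          (fun i h1 h2 => by simp [within_scope])
  · exact A_eq_B lines (fun i => within_scope i (some c) none (some a) (some b)) a b
          (fun i h1 h2 => by simp [within_scope])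
  · exact A_eq_B lines (fun i => within_scope i (some c) (some d) (some a) (some b)) a b
          (fun i h1 h2 => by simp [within_scope])
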